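-- pv_equiv track=rewrite | github.com/rmentos/MicroPython-IR-monitor | bpm.py | time_between
-- ===== SOURCE A (Python) =====
-- def time_between(maximas):
--     time_maxes = []
--     found_num = False
--     count = 0
--     for element in maximas:
--         if element > 0 and not found_num:
--             found_num = True
--         elif element > 0 and  found_num:
--             time_maxes.append(count)
--             count = 0
--         elif found_num:
--             count = count + 1
--         else:
--             continue
--     return time_maxes
-- ===== SOURCE B (Python) =====
-- def time_between(maximas):
--     positions = [i for i, e in enumerate(maximas) if e > 0]
--     return [j - i - 1 for i, j in zip(positions, positions[1:])]
-- ===== Notes on version B (the rewrite author's own statement) =====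
-- stated objective: simpler
-- what changed: Replaces the stateful scan (found flag, running counter, append/reset) with an index table of positive positions followed by consecutive-difference arithmetic.
import Mathlib
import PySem

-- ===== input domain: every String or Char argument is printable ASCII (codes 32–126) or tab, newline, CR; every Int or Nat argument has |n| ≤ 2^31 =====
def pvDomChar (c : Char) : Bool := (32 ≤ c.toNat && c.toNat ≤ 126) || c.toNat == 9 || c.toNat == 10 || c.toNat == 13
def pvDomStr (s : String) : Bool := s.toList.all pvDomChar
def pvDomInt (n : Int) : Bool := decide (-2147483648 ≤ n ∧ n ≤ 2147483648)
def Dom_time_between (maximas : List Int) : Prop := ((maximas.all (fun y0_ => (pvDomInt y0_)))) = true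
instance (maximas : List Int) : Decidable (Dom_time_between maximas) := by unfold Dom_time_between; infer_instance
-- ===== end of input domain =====

-- B replaces A's stateful scan (flag + counter + append/reset) with an index table
-- of positive positions followed by consecutive differences; objective: simpler.

-- ===== PORT A =====
-- literal transliteration of A's loop: state (time_maxes, found_num, count)
def timeBetweenLoopA : List Int → List Int → Bool → Int → List Int
  | [], time_maxes, _, _ => time_maxes
  | element :: rest, time_maxes, found_num, count =>
    if element > 0 ∧ found_num = false then
      timeBetweenLoopA rest time_maxes true count
    else if element > 0 ∧ found_num = true then
      timeBetweenLoopA rest (time_maxes ++ [count]) found_num 0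
    else if found_num = true then
      timeBetweenLoopA rest time_maxes found_num (count + 1)
    else
      timeBetweenLoopA rest time_maxes found_num count

def time_between (maximas : List Int) : List Int :=
  timeBetweenLoopA maximas [] false 0

-- ===== PORT B =====
def time_between_alt (maximas : List Int) : List Int :=
  let positions := ((PySem.List.enumerate maximas).filter (fun p => p.2 > 0)).map (fun p => p.1)
  (positions.zip (positions.drop 1)).map (fun p => p.2 - p.1 - 1)

-- ===== PRECONDITION & SPEC =====
def Spec_time_between (maximas : List Int) (out : List Int) : Prop := out = time_between_alt maximas
instance (maximas : List Int) (out : List Int) : Decidable (Spec_time_between maximas out) := by unfold Spec_time_between; infer_instance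

-- ===== CLAIM (what is proved, stated in full; the proofs are below) =====
def Claim_equal_time_between : Prop := ∀ (maximas : List Int), Dom_time_between maximas → Spec_time_between maximas (time_between maximas)

-- ===== LEMMAS AND PROOFS =====

-- canonical spec: gapsFrom xs c = gaps emitted after a positive was seen with c nonpositives counted
def gapsFrom : List Int → Int → List Int
  | [], _ => []
  | x :: xs, c => if x > 0 then c :: gapsFrom xs 0 else gapsFrom xs (c + 1)

def gaps : List Int → List Int
  | [] => []
  | x :: xs => if x > 0 then gapsFrom xs 0 else gaps xs

-- positions of positive elements, enumeration starting at n
def posFrom : List Int → Int → List Int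
  | [], _ => []
  | x :: xs, n => if x > 0 then n :: posFrom xs (n + 1) else posFrom xs (n + 1)

def diffs (l : List Int) : List Int :=
  (l.zip (l.drop 1)).map (fun p => p.2 - p.1 - 1)

theorem loopA_found (xs : List Int) : ∀ (acc : List Int) (c : Int),
    timeBetweenLoopA xs acc true c = acc ++ gapsFrom xs c := by
  induction xs with
  | nil => intro acc c; simp [timeBetweenLoopA, gapsFrom]
  | cons x xs ih =>
    intro acc c
    by_cases hx : x > 0 <;> simp [timeBetweenLoopA, gapsFrom, hx, ih]

theorem loopA_unfound (xs : List Int) : ∀ (acc : List Int),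
    timeBetweenLoopA xs acc false 0 = acc ++ gaps xs := by
  induction xs with
  | nil => intro acc; simp [timeBetweenLoopA, gaps]
  | cons x xs ih =>
    intro acc
    by_cases hx : x > 0 <;> simp [timeBetweenLoopA, gaps, hx, ih, loopA_found]

theorem diffs_cons_posFrom (xs : List Int) : ∀ (m n : Int),
    diffs (m :: posFrom xs n) = gapsFrom xs (n - m - 1) := by
  induction xs with
  | nil => intro m n; simp [posFrom, diffs, gapsFrom]
  | cons x xs ih =>
    intro m n
    by_cases hx : x > 0
    · have h1 := ih n (n + 1)
      simp only [posFrom, gapsFrom, hx, if_pos]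
      simp only [diffs, List.drop, List.zip_cons_cons, List.map_cons] at h1 ⊢
      rw [h1]
      norm_num
    · have h1 := ih m (n + 1)
      simp only [posFrom, gapsFrom, hx, if_neg, not_false_iff]
      rw [h1]
      ring_nf

theorem diffs_posFrom (xs : List Int) : ∀ (n : Int), diffs (posFrom xs n) = gaps xs := by
  induction xs with
  | nil => intro n; simp [posFrom, diffs, gaps]
  | cons x xs ih =>
    intro n
    by_cases hx : x > 0
    · simp only [posFrom, gaps, hx, if_pos]
      rw [diffs_cons_posFrom]
      norm_num
    · simp [posFrom, gaps, hx, ih]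

theorem filter_enumerate_eq_posFrom (xs : List Int) : ∀ (n : Int),
    ((PySem.List.enumerate xs n).filter (fun p => p.2 > 0)).map (fun p => p.1) = posFrom xs n := by
  induction xs with
  | nil => intro n; simp [PySem.List.enumerate, posFrom]
  | cons x xs ih =>
    intro n
    by_cases hx : x > 0 <;>
      simp [PySem.List.enumerate_cons, posFrom, hx, ih]

-- ===== VERDICT (by name: the statement is the Claim_ definition above) =====
theorem time_between_spec : Claim_equal_time_between := by
  intro maximas _
  unfold Spec_time_between time_between time_between_alt
  rw [loopA_unfound]
  simp only [List.nil_append]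
  rw [filter_enumerate_eq_posFrom]
  exact (diffs_posFrom maximas 0).symm
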